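-- pv_equiv track=rewrite | github.com/Maksymilianx/Interview_exercises | Junior_exercises/Codility_test_exercise_2.py | solution
-- ===== SOURCE A (Python) =====
-- def solution(S, C):
--     """
--
--     :param S: takes a string of the same many letters eg. 'aabbccc'
--     :param C: add price/point to each letter
--     :return: removes the highest price from the duplicates and returns sum of the lowest price of letters.
--     """
--     many = []
--     cost = 0
--     previous = None
--     # We can use "C.append" and "S +=" to force loop to finish last iteration
--     # C.append(None)
--     # S += '.'
--     x = zip(S, C)
--     for s, c in x:
--         if s != previous:
--             previous = s
--             if len(many) != 0:
--                 cost += sum(many) - max(many)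
--             many = [c]
--         else:
--             many.append(c)
--     # Or we can simply use if statement
--     if len(many) != 0:
--         cost += sum(many) - max(many)
--     return cost
-- ===== SOURCE B (Python) =====
-- def solution(S, C):
--     """Single-pass scalar version: per consecutive-letter run, sum(run) - max(run)
--     telescopes to adding min(running_max, c) on each repeat."""
--     cost = 0
--     previous = None
--     cur_max = 0
--     for s, c in zip(S, C):
--         if s == previous:
--             cost += min(cur_max, c)
--             cur_max = max(cur_max, c)
--         else:
--             previous = s
--             cur_max = c
--     return cost
-- ===== Notes on version B (the rewrite author's own statement) =====
-- stated objective: simpler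
-- what changed: Replaces the per-run list (with its sum/max recomputation and trailing flush) by a scalar running maximum: each repeated letter adds min(cur_max, c) immediately, which telescopes to sum(run) - max(run); O(1) extra space, no list allocation.
import Mathlib
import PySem

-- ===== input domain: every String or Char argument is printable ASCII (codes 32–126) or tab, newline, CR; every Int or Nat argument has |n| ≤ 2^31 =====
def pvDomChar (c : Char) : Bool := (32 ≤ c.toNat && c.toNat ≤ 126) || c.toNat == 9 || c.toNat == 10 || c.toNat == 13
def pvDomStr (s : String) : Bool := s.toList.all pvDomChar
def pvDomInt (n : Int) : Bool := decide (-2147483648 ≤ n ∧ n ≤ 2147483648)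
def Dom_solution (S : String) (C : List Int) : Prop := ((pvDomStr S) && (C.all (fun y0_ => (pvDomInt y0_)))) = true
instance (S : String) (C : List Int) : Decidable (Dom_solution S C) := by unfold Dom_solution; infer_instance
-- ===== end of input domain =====

-- B is 'simpler': O(1) extra space — a scalar running max replaces A's per-run list with sum/max recomputation; return values proved equal.

-- ===== PORT A =====
-- max(many) on a nonempty list (value of Python's max of a nonempty int list)
def pyMaxA (many : List Int) : Int := (PySem.List.max? many (fun y => y)).getD 0

-- loop body of A: state is (many, cost, previous)
def stepA (st : List Int × Int × Option Char) (sc : Char × Int) : List Int × Int × Option Char :=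
  if some sc.1 ≠ st.2.2 then
    ([sc.2],
     if st.1.length ≠ 0 then st.2.1 + (st.1.sum - pyMaxA st.1) else st.2.1,
     some sc.1)
  else (st.1 ++ [sc.2], st.2.1, st.2.2)

def solution (S : String) (C : List Int) : Int :=
  let r := (S.toList.zip C).foldl stepA ([], 0, none)
  if r.1.length ≠ 0 then r.2.1 + (r.1.sum - pyMaxA r.1) else r.2.1

-- ===== PORT B =====
-- loop body of B: state is (cost, previous, cur_max)
def stepB (st : Int × Option Char × Int) (sc : Char × Int) : Int × Option Char × Int :=
  if some sc.1 = st.2.1 then (st.1 + min st.2.2 sc.2, st.2.1, max st.2.2 sc.2)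
  else (st.1, some sc.1, sc.2)

def solution_alt (S : String) (C : List Int) : Int :=
  ((S.toList.zip C).foldl stepB (0, none, 0)).1

-- ===== PRECONDITION & SPEC =====
def Spec_solution (S : String) (C : List Int) (out : Int) : Prop := out = solution_alt S C
instance (S : String) (C : List Int) (out : Int) : Decidable (Spec_solution S C out) := by unfold Spec_solution; infer_instance

-- ===== CLAIM (what is proved, stated in full; the proofs are below) =====
def Claim_equal_solution : Prop := ∀ (S : String) (C : List Int), Dom_solution S C → Spec_solution S C (solution S C)

-- ===== LEMMAS AND PROOFS =====

lemma pyMaxA_cons (x : Int) (t : List Int) :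
    pyMaxA (x :: t) = t.foldl max x := by
  simp [pyMaxA, PySem.List.max?_id_cons]

lemma pyMaxA_append_singleton (x c : Int) (t : List Int) :
    pyMaxA ((x :: t) ++ [c]) = max (pyMaxA (x :: t)) c := by
  simp [pyMaxA_cons, List.foldl_append]

-- main loop invariant: from a running state (nonempty many) both folds agree after A's trailing flush
lemma loop_eq (zs : List (Char × Int)) :
    ∀ (x : Int) (t : List Int) (cost : Int) (p : Char),
    (let r := zs.foldl stepA (x :: t, cost, some p)
     if r.1.length ≠ 0 then r.2.1 + (r.1.sum - pyMaxA r.1) else r.2.1)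
    = (zs.foldl stepB (cost + ((x :: t).sum - pyMaxA (x :: t)), some p, pyMaxA (x :: t))).1 := by
  induction zs with
  | nil => intro x t cost p; simp
  | cons sc zs ih =>
    intro x t cost p
    by_cases h : sc.1 = p
    · -- repeat: A appends, B adds min and raises the running max
      have hA : stepA (x :: t, cost, some p) sc = ((x :: t) ++ [sc.2], cost, some p) := by
        simp [stepA, h]
      have hB : stepB (cost + ((x :: t).sum - pyMaxA (x :: t)), some p, pyMaxA (x :: t)) sc
          = (cost + ((x :: t).sum - pyMaxA (x :: t)) + min (pyMaxA (x :: t)) sc.2,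
             some p, max (pyMaxA (x :: t)) sc.2) := by
        simp [stepB, h]
      simp only [List.foldl_cons, hA, hB]
      have := ih x (t ++ [sc.2]) cost p
      simp only [List.cons_append] at this ⊢
      rw [this]
      have hmax : pyMaxA (x :: (t ++ [sc.2])) = max (pyMaxA (x :: t)) sc.2 := by
        have := pyMaxA_append_singleton x sc.2 t
        simpa using this
      have hmm : min (pyMaxA (x :: t)) sc.2 + max (pyMaxA (x :: t)) sc.2
          = pyMaxA (x :: t) + sc.2 := min_add_max _ _
      have hcost : cost + ((x :: (t ++ [sc.2])).sum - max (pyMaxA (x :: t)) sc.2)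
          = cost + ((x :: t).sum - pyMaxA (x :: t)) + min (pyMaxA (x :: t)) sc.2 := by
        simp only [List.sum_cons, List.sum_append, List.sum_nil]
        omega
      rw [hmax, hcost]
    · -- new run: A flushes and restarts, B restarts the scalar state
      have hA : stepA (x :: t, cost, some p) sc
          = ([sc.2], cost + ((x :: t).sum - pyMaxA (x :: t)), some sc.1) := by
        simp [stepA, h]
      have hB : stepB (cost + ((x :: t).sum - pyMaxA (x :: t)), some p, pyMaxA (x :: t)) sc
          = (cost + ((x :: t).sum - pyMaxA (x :: t)), some sc.1, sc.2) := by
        simp [stepB, h]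
      simp only [List.foldl_cons, hA, hB]
      have := ih sc.2 [] (cost + ((x :: t).sum - pyMaxA (x :: t))) sc.1
      simpa [pyMaxA_cons] using this

-- ===== VERDICT (by name: the statement is the Claim_ definition above) =====
theorem solution_spec : Claim_equal_solution := by
  intro S C _
  unfold Spec_solution solution solution_alt
  cases hz : S.toList.zip C with
  | nil => simp
  | cons sc zs =>
    have hA : stepA ([], 0, none) sc = ([sc.2], 0, some sc.1) := by simp [stepA]
    have hB : stepB (0, none, 0) sc = (0, some sc.1, sc.2) := by simp [stepB]
    simp only [List.foldl_cons, hA, hB]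
    have := loop_eq zs sc.2 [] 0 sc.1
    simpa [pyMaxA_cons] using this
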